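-- pv_equiv track=rewrite | github.com/mpenning/ciscoconfparse | ciscoconfparse/local_py/Exscript/util/ipv6.py | clean_ip
-- ===== SOURCE A (Python) =====
-- def normalize_ip(ip):
--     """
--     Transform the address into a standard, fixed-length form, such as:
--
--         1234:0:01:02:: -> 1234:0000:0001:0002:0000:0000:0000:0000
--         1234::A -> 1234:0000:0000:0000:0000:0000:0000:000a
--
--     @type  ip: string
--     @param ip: An IP address.
--     @rtype:  string
--     @return: The normalized IP.
--     """
--     theip = ip
--     if theip.startswith('::'):
--         theip = '0' + theip
--     if theip.endswith('::'):
--         theip += '0'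
--     segments = theip.split(':')
--     if len(segments) == 1:
--         raise ValueError('no colons in ipv6 address: ' + repr(ip))
--     fill = 8 - len(segments)
--     if fill < 0:
--         raise ValueError('ipv6 address has too many segments: ' + repr(ip))
--     result = []
--     for segment in segments:
--         if segment == '':
--             if fill == 0:
--                 raise ValueError('unexpected double colon: ' + repr(ip))
--             for n in range(fill + 1):
--                 result.append('0000')
--             fill = 0
--         else:
--             try:
--                 int(segment, 16)
--             except ValueError:
--                 raise ValueError('invalid hex value in ' + repr(ip))
--             result.append(segment.rjust(4, '0'))
--     return ':'.join(result).lower()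
--
-- def clean_ip(ip):
--     """
--     Cleans the ip address up, useful for removing leading zeros, e.g.::
--
--         1234:0:01:02:: -> 1234:0:1:2::
--         1234:0000:0000:0000:0000:0000:0000:000A -> 1234::a
--         1234:0000:0000:0000:0001:0000:0000:0000 -> 1234:0:0:0:1::
--         0000:0000:0000:0000:0001:0000:0000:0000 -> ::1:0:0:0
--
--     @type  ip: string
--     @param ip: An IP address.
--     @rtype:  string
--     @return: The cleaned up IP.
--     """
--     theip    = normalize_ip(ip)
--     segments = ['%x' % int(s, 16) for s in theip.split(':')]
--
--     # Find the longest consecutive sequence of zeroes.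
--     seq      = {0: 0}
--     start    = None
--     count    = 0
--     for n, segment in enumerate(segments):
--         if segment != '0':
--             start = None
--             count = 0
--             continue
--         if start is None:
--             start = n
--         count += 1
--         seq[count] = start
--
--     # Replace those zeroes by a double colon.
--     count  = max(seq)
--     start  = seq[count]
--     result = []
--     for n, segment in enumerate(segments):
--         if n == start and count > 1:
--             if n == 0:
--                 result.append('')
--             result.append('')
--             if n == 7:
--                 result.append('')
--             continue
--         elif start < n < start + count:
--             if n == 7:
--                 result.append('')
--             continue
--         result.append(segment)
--     return ':'.join(result)
-- ===== SOURCE B (Python) =====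
-- def normalize_ip(ip):
--     theip = ip
--     if theip.startswith('::'):
--         theip = '0' + theip
--     if theip.endswith('::'):
--         theip += '0'
--     segments = theip.split(':')
--     if len(segments) == 1:
--         raise ValueError('no colons in ipv6 address: ' + repr(ip))
--     fill = 8 - len(segments)
--     if fill < 0:
--         raise ValueError('ipv6 address has too many segments: ' + repr(ip))
--     result = []
--     for segment in segments:
--         if segment == '':
--             if fill == 0:
--                 raise ValueError('unexpected double colon: ' + repr(ip))
--             for n in range(fill + 1):
--                 result.append('0000')
--             fill = 0
--         else:
--             try:
--                 int(segment, 16)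
--             except ValueError:
--                 raise ValueError('invalid hex value in ' + repr(ip))
--             result.append(segment.rjust(4, '0'))
--     return ':'.join(result).lower()
--
-- def clean_ip(ip):
--     theip = normalize_ip(ip)
--     segments = ['%x' % int(s, 16) for s in theip.split(':')]
--     # One pass: find the longest run of '0' segments (last run wins ties).
--     best_start = 0
--     best_len = 0
--     run_start = None
--     for n, segment in enumerate(segments):
--         if segment != '0':
--             run_start = None
--             continue
--         if run_start is None:
--             run_start = n
--         length = n - run_start + 1
--         if length >= best_len:
--             best_start = run_start
--             best_len = length
--     if best_len <= 1:
--         return ':'.join(segments)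
--     # Rebuild by slicing around the compressed run (an IPv6 address has 8 groups).
--     out = ([''] if best_start == 0 else []) \
--         + segments[:best_start] + [''] + segments[best_start + best_len:] \
--         + ([''] if best_start + best_len == 8 else [])
--     return ':'.join(out)
-- ===== Notes on version B (the rewrite author's own statement) =====
-- stated objective: simpler
-- what changed: A finds the zero run via a dict mapping every reached run length to its start, then takes max(seq), and rebuilds the address element-by-element with skip/continue logic; B replaces both passes by a single best-run scan (best_start/best_len, with >= so the last longest run wins) and a slice-based reconstruction around the compressed run.
-- outside the precondition, e.g. on clean_ip('0x10:1'): A returns '10:1', B returns '10:1'; on clean_ip('  12:0'): A returns '12:0', B returns '12:0'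
import Mathlib
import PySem

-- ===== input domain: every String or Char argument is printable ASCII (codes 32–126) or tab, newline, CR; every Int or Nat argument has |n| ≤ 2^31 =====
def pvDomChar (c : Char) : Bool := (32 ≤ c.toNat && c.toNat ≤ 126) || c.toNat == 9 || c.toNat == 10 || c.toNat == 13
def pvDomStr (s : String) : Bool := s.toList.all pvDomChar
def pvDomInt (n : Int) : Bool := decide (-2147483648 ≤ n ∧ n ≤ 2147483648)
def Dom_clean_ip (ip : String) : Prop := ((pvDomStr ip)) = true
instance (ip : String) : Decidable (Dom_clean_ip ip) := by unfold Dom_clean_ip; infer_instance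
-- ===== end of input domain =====

-- B replaces A's seq-dict bookkeeping and element-wise rebuild by a single best-run scan
-- and a slice-based reconstruction (objective: simpler; same asymptotic cost).

-- ===== PORT A =====
-- shared helpers: both Pythons contain the identical normalize_ip helper and the identical
-- `segments = ['%x' % int(s, 16) for s in theip.split(':')]` line, so their ports share these.

-- '%x' % v  (exact: lowercase hex digits, '-' prefix for negatives)
def pvHexFmt (v : Int) : List Char :=
  if v < 0 then '-' :: Nat.toDigits 16 (-v).toNat else Nat.toDigits 16 v.toNat

-- segment.rjust(4, '0')  (exact)
def pvRjust4 (s : List Char) : List Char :=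
  if 4 ≤ s.length then s else List.replicate (4 - s.length) '0' ++ s

-- the for-loop of normalize_ip; none = the ValueError raises inside the loop
def pvNormLoop : List (List Char) → Int → Option (List (List Char))
  | [], _ => some []
  | s :: rest, fill =>
    if s = [] then
      if fill = 0 then none
      else (pvNormLoop rest 0).map (fun r => List.replicate (fill.toNat + 1) ['0','0','0','0'] ++ r)
    else
      match PySem.Int.ofCharsBase? s 16 with
      | none => none
      | some _ => (pvNormLoop rest fill).map (fun r => pvRjust4 s :: r)

-- normalize_ip; none = ValueError
def pvNormalize? (ip : List Char) : Option (List Char) :=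
  let t1 := if PySem.Chars.startswith ip [':', ':'] then '0' :: ip else ip
  let t2 := if PySem.Chars.endswith t1 [':', ':'] then t1 ++ ['0'] else t1
  let segs := PySem.Chars.splitOn t2 [':']
  if segs.length = 1 then none
  else
    let fill : Int := 8 - segs.length
    if fill < 0 then none
    else (pvNormLoop segs fill).map (fun r => PySem.Chars.lower (PySem.Chars.join [':'] r))

-- [int(s, 16) for s in …]; none = ValueError
def pvParseAll : List (List Char) → Option (List Int)
  | [] => some []
  | s :: rest =>
    match PySem.Int.ofCharsBase? s 16 with
    | none => none
    | some v => (pvParseAll rest).map (v :: ·)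

-- theip = normalize_ip(ip); segments = ['%x' % int(s, 16) for s in theip.split(':')]
def pvSegments? (ip : List Char) : Option (List (List Char)) :=
  match pvNormalize? ip with
  | none => none
  | some theip => (pvParseAll (PySem.Chars.splitOn theip [':'])).map (fun vs => vs.map pvHexFmt)

-- A's first loop body; state (seq, start, count), start as Option Int for Python's None
def pvSeqStep (acc : PySem.Dict Int Int × Option Int × Int) (p : Int × List Char) :
    PySem.Dict Int Int × Option Int × Int :=
  if p.2 ≠ ['0'] then (acc.1, none, 0)
  else
    let s0 := acc.2.1.getD p.1          -- if start is None: start = n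
    (acc.1.insert (acc.2.2 + 1) s0, some s0, acc.2.2 + 1)

-- A's first loop plus count = max(seq); start = seq[count]  (the key is always present)
def pvStage1A (segments : List (List Char)) : Int × Int :=
  let st := (PySem.List.enumerate segments).foldl pvSeqStep (PySem.Dict.empty.insert 0 0, none, 0)
  let count := (PySem.List.max? (PySem.Dict.keys st.1) (fun x => x)).getD 0
  (count, PySem.Dict.getD st.1 count 0)

-- A's second loop body
def pvOutStepA (start count : Int) (acc : List (List Char)) (p : Int × List Char) : List (List Char) :=
  if p.1 = start ∧ 1 < count then
    acc ++ (if p.1 = 0 then [([] : List Char)] else []) ++ [[]] ++ (if p.1 = 7 then [([] : List Char)] else [])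
  else if start < p.1 ∧ p.1 < start + count then
    acc ++ (if p.1 = 7 then [([] : List Char)] else [])
  else acc ++ [p.2]

-- A's second loop and final join
def pvStage2A (segments : List (List Char)) (start count : Int) : List Char :=
  PySem.Chars.join [':'] ((PySem.List.enumerate segments).foldl (pvOutStepA start count) [])

def clean_ip (ip : String) : String :=
  match pvSegments? ip.toList with
  | none => ""                              -- Python raises ValueError here; excluded by Pre_
  | some segments =>
    String.ofList (pvStage2A segments (pvStage1A segments).2 (pvStage1A segments).1)

-- ===== PORT B =====
-- B's single scan: state (best_start, best_len, run_start)
def pvScanStep (acc : Int × Int × Option Int) (p : Int × List Char) : Int × Int × Option Int :=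
  if p.2 ≠ ['0'] then (acc.1, acc.2.1, none)
  else
    let rs := acc.2.2.getD p.1
    if acc.2.1 ≤ p.1 - rs + 1 then (rs, p.1 - rs + 1, some rs)
    else (acc.1, acc.2.1, some rs)

def pvScanB (segments : List (List Char)) : Int × Int × Option Int :=
  (PySem.List.enumerate segments).foldl pvScanStep (0, 0, none)

-- B's slice-based rebuild (best_start/best_len are ≥ 0 by construction, so take/drop are exact
-- for the Python slices segments[:best_start] and segments[best_start+best_len:])
def pvBuildB (segments : List (List Char)) (bs bl : Int) : List Char :=
  if bl ≤ 1 then PySem.Chars.join [':'] segments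
  else
    PySem.Chars.join [':']
      ((if bs = 0 then [([] : List Char)] else []) ++
        (segments.take bs.toNat ++ [([] : List Char)] ++ segments.drop (bs + bl).toNat) ++
        (if bs + bl = 8 then [([] : List Char)] else []))

def clean_ip_alt (ip : String) : String :=
  match pvSegments? ip.toList with
  | none => ""                              -- Python raises ValueError here; excluded by Pre_
  | some segments =>
    String.ofList (pvBuildB segments (pvScanB segments).1 (pvScanB segments).2.1)

-- ===== PRECONDITION & SPEC =====
def pvIsHex (c : Char) : Bool := c.isDigit || ('a' ≤ c && c ≤ 'f') || ('A' ≤ c && c ≤ 'F')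

-- Pre_ excludes every input on which A raises ValueError, and (narrowing, see cites) it keeps
-- only pure-hex segments: int(s, 16) also accepts whitespace, sign, base-prefix and underscore
-- decorations, for which A returns at all only when the decorated segment accidentally survives
-- the rjust-then-reparse round trip inside clean_ip.
def Pre_clean_ip (ip : String) : Prop :=
  let t1 := if PySem.Chars.startswith ip.toList [':', ':'] then '0' :: ip.toList else ip.toList
  let t2 := if PySem.Chars.endswith t1 [':', ':'] then t1 ++ ['0'] else t1
  let segs := PySem.Chars.splitOn t2 [':']
  2 ≤ segs.length ∧ segs.length ≤ 8 ∧ (∀ s ∈ segs, s.all pvIsHex = true) ∧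
  segs.count [] ≤ 1 ∧ (segs.count [] = 1 → segs.length ≤ 7)
instance (ip : String) : Decidable (Pre_clean_ip ip) := by unfold Pre_clean_ip; infer_instance

def pvWitness_clean_ip : String := "1234:0:01:02::"

def Spec_clean_ip (ip : String) (out : String) : Prop := out = clean_ip_alt ip
instance (ip : String) (out : String) : Decidable (Spec_clean_ip ip out) := by unfold Spec_clean_ip; infer_instance

-- ===== CLAIM (what is proved, stated in full; the proofs are below) =====
def Claim_equal_clean_ip : Prop := ∀ (ip : String), Dom_clean_ip ip → Pre_clean_ip ip → Spec_clean_ip ip (clean_ip ip)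

-- ===== LEMMAS AND PROOFS =====

theorem pv_max_range (n : Nat) :
    PySem.List.max? ((List.range (n+1)).map Int.ofNat) (fun x => x) = some (n : Int) := by
  rcases h : PySem.List.max? ((List.range (n+1)).map Int.ofNat) (fun x => x) with _ | m
  · rw [PySem.List.max?_eq_none_iff] at h
    simp at h
  · have hm := PySem.List.max?_mem h
    have hmax := PySem.List.max?_isMax h ((n : Int)) (by simp)
    simp only [List.mem_map, List.mem_range] at hm
    obtain ⟨k, hk, rfl⟩ := hm
    have : (k : Int) = (n : Int) := le_antisymm (by exact_mod_cast Nat.lt_succ_iff.mp hk) hmax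
    simp [this]

def ScanInv (k : Int) (a : PySem.Dict Int Int × Option Int × Int) (b : Int × Int × Option Int) : Prop :=
  a.2.1 = b.2.2 ∧ 0 ≤ a.2.2 ∧ a.2.2 ≤ b.2.1 ∧ 0 ≤ b.2.1 ∧
  (match b.2.2 with | none => a.2.2 = 0 | some r => 0 ≤ r ∧ a.2.2 = k - r) ∧
  PySem.Dict.keys a.1 = (List.range (b.2.1.toNat + 1)).map Int.ofNat ∧
  PySem.Dict.getD a.1 b.2.1 0 = b.1 ∧ 0 ≤ b.1 ∧ b.1 + b.2.1 ≤ k ∧ (b.2.1 = 0 → b.1 = 0)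

theorem pv_contains_iff {d : PySem.Dict Int Int} {k : Int} : d.contains k = true ↔ k ∈ d.keys :=
  PySem.Dict.contains_iff_mem_keys d k

theorem pv_keys_grow {seq : PySem.Dict Int Int} {bl : Int} (h6 : PySem.Dict.keys seq = (List.range (bl.toNat + 1)).map Int.ofNat)
    (c r0 : Int) (hnew : bl = c) (hbl0 : 0 ≤ bl) :
    PySem.Dict.keys (seq.insert (c+1) r0) = (List.range ((c+1).toNat + 1)).map Int.ofNat := by
  have hkeys : PySem.Dict.contains seq (c+1) = false := by
    rw [Bool.eq_false_iff, ne_eq, pv_contains_iff, h6]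
    simp only [List.mem_map, List.mem_range, Int.ofNat_eq_natCast]
    rintro ⟨j, hj, hjc⟩
    omega
  rw [PySem.Dict.keys_insert_of_not_contains seq _ hkeys, h6]
  conv_rhs => rw [show (c+1).toNat + 1 = (bl.toNat + 1) + 1 from by omega, List.range_succ]
  rw [List.map_append]
  congr 1
  simp only [List.map_cons, List.map_nil, Int.ofNat_eq_natCast, List.cons.injEq, and_true]
  omega

theorem pv_keys_keep {seq : PySem.Dict Int Int} {bl : Int} (h6 : PySem.Dict.keys seq = (List.range (bl.toNat + 1)).map Int.ofNat)
    (c r0 : Int) (hle : c + 1 ≤ bl) (hc : 0 ≤ c) :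
    PySem.Dict.keys (seq.insert (c+1) r0) = (List.range (bl.toNat + 1)).map Int.ofNat := by
  rw [PySem.Dict.keys_insert_of_contains seq _ ?_, h6]
  rw [pv_contains_iff, h6]
  simp only [List.mem_map, List.mem_range, Int.ofNat_eq_natCast]
  exact ⟨(c+1).toNat, by omega, by omega⟩

theorem pv_scan_step (k : Int) (x : List Char) (a : PySem.Dict Int Int × Option Int × Int)
    (b : Int × Int × Option Int) (h : ScanInv k a b) :
    ScanInv (k+1) (pvSeqStep a (k, x)) (pvScanStep b (k, x)) := by
  obtain ⟨seq, st, c⟩ := a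
  obtain ⟨bs, bl, rs⟩ := b
  obtain ⟨h1, h2, h3, h4, h5, h6, h7, h8, h9, h10⟩ := h
  simp only at h1 h2 h3 h4 h5 h6 h7 h8 h9 h10
  by_cases hx : x = ['0']
  · subst hx
    rcases rs with _ | r
    · simp only at h5
      have eA : pvSeqStep (seq, st, c) (k, ['0']) = (seq.insert (c+1) k, some k, c+1) := by
        simp only [pvSeqStep, ne_eq, not_true_eq_false, if_false, h1, Option.getD_none]
      by_cases hbl : bl ≤ k - k + 1
      · have eB : pvScanStep (bs, bl, none) (k, ['0']) = (k, k - k + 1, some k) := by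
          simp only [pvScanStep, ne_eq, not_true_eq_false, if_false, Option.getD_none, if_pos hbl]
        rw [eA, eB]
        unfold ScanInv
        dsimp only
        refine ⟨rfl, by omega, by omega, by omega, ⟨by omega, by omega⟩, ?_, ?_, by omega, by omega, by omega⟩
        · show PySem.Dict.keys (seq.insert (c+1) k) = (List.range ((k - k + 1).toNat + 1)).map Int.ofNat
          rw [show (k - k + 1).toNat = (c+1).toNat from by omega]
          rcases (by omega : bl = 0 ∨ bl = 1) with hb | hb
          · exact pv_keys_grow h6 c k (by omega) (by omega)
          · rw [show (c+1).toNat = bl.toNat from by omega]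
            exact pv_keys_keep h6 c k (by omega) (by omega)
        · show PySem.Dict.getD (seq.insert (c+1) k) (k - k + 1) 0 = k
          rw [show k - k + 1 = c + 1 from by omega, PySem.Dict.getD_insert]
          simp
      · have eB : pvScanStep (bs, bl, none) (k, ['0']) = (bs, bl, some k) := by
          simp only [pvScanStep, ne_eq, not_true_eq_false, if_false, Option.getD_none, if_neg hbl]
        rw [eA, eB]
        unfold ScanInv
        dsimp only
        refine ⟨rfl, by omega, by omega, by omega, ⟨by omega, by omega⟩, ?_, ?_, by omega, by omega, by omega⟩
        · exact pv_keys_keep h6 c k (by omega) (by omega)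
        · show PySem.Dict.getD (seq.insert (c+1) k) bl 0 = bs
          rw [PySem.Dict.getD_insert, if_neg (by omega)]
          exact h7
    · simp only at h5
      obtain ⟨hr0, hcr⟩ := h5
      have eA : pvSeqStep (seq, st, c) (k, ['0']) = (seq.insert (c+1) r, some r, c+1) := by
        simp only [pvSeqStep, ne_eq, not_true_eq_false, if_false, h1, Option.getD_some]
      by_cases hbl : bl ≤ k - r + 1
      · have eB : pvScanStep (bs, bl, some r) (k, ['0']) = (r, k - r + 1, some r) := by
          simp only [pvScanStep, ne_eq, not_true_eq_false, if_false, Option.getD_some, if_pos hbl]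
        rw [eA, eB]
        unfold ScanInv
        dsimp only
        refine ⟨rfl, by omega, by omega, by omega, ⟨by omega, by omega⟩, ?_, ?_, by omega, by omega, by omega⟩
        · show PySem.Dict.keys (seq.insert (c+1) r) = (List.range ((k - r + 1).toNat + 1)).map Int.ofNat
          rw [show (k - r + 1).toNat = (c+1).toNat from by omega]
          rcases (by omega : bl = c ∨ bl = c + 1) with hb | hb
          · exact pv_keys_grow h6 c r (by omega) (by omega)
          · rw [show (c+1).toNat = bl.toNat from by omega]
            exact pv_keys_keep h6 c r (by omega) (by omega)
        · show PySem.Dict.getD (seq.insert (c+1) r) (k - r + 1) 0 = r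
          rw [show k - r + 1 = c + 1 from by omega, PySem.Dict.getD_insert]
          simp
      · have eB : pvScanStep (bs, bl, some r) (k, ['0']) = (bs, bl, some r) := by
          simp only [pvScanStep, ne_eq, not_true_eq_false, if_false, Option.getD_some, if_neg hbl]
        rw [eA, eB]
        unfold ScanInv
        dsimp only
        refine ⟨rfl, by omega, by omega, by omega, ⟨by omega, by omega⟩, ?_, ?_, by omega, by omega, by omega⟩
        · exact pv_keys_keep h6 c r (by omega) (by omega)
        · show PySem.Dict.getD (seq.insert (c+1) r) bl 0 = bs
          rw [PySem.Dict.getD_insert, if_neg (by omega)]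
          exact h7
  · have eA : pvSeqStep (seq, st, c) (k, x) = (seq, none, 0) := by
      simp only [pvSeqStep, ne_eq, if_pos hx]
    have eB : pvScanStep (bs, bl, rs) (k, x) = (bs, bl, none) := by
      simp only [pvScanStep, ne_eq, if_pos hx]
    rw [eA, eB]
    unfold ScanInv
    dsimp only
    exact ⟨rfl, le_refl 0, h4, h4, rfl, h6, h7, h8, by omega, h10⟩

theorem pv_scan_fold (xs : List (List Char)) : ∀ (k : Int) (a : PySem.Dict Int Int × Option Int × Int)
    (b : Int × Int × Option Int), ScanInv k a b →
    ScanInv (k + xs.length) ((PySem.List.enumerate xs k).foldl pvSeqStep a)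
      ((PySem.List.enumerate xs k).foldl pvScanStep b) := by
  induction xs with
  | nil => intro k a b h; simpa [PySem.List.enumerate] using h
  | cons x t ih =>
    intro k a b h
    rw [PySem.List.enumerate_cons]
    simp only [List.foldl_cons]
    have h2 := ih (k+1) _ _ (pv_scan_step k x a b h)
    have e : k + ((x :: t).length : Int) = (k+1) + t.length := by
      simp only [List.length_cons]
      push_cast
      ring
    rw [e]
    exact h2

theorem pv_stage1_eq (segs : List (List Char)) :
    pvStage1A segs = ((pvScanB segs).2.1, (pvScanB segs).1) ∧
    0 ≤ (pvScanB segs).1 ∧ 0 ≤ (pvScanB segs).2.1 ∧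
    (pvScanB segs).1 + (pvScanB segs).2.1 ≤ segs.length ∧
    ((pvScanB segs).2.1 = 0 → (pvScanB segs).1 = 0) := by
  have h0 : ScanInv 0 (PySem.Dict.empty.insert 0 0, none, 0) (0, 0, none) := by
    unfold ScanInv
    dsimp only
    exact ⟨rfl, le_refl 0, le_refl 0, le_refl 0, rfl, by rfl, by rfl, le_refl 0, le_refl 0,
      fun _ => rfl⟩
  have h := pv_scan_fold segs 0 _ _ h0
  rw [zero_add] at h
  obtain ⟨⟨bs, bl, rs⟩, hB⟩ : ∃ p : Int × Int × Option Int, pvScanB segs = p := ⟨_, rfl⟩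
  unfold pvScanB at hB
  rw [hB] at h
  unfold ScanInv at h
  dsimp only at h
  obtain ⟨h1, h2, h3, h4, h5, h6, h7, h8, h9, h10⟩ := h
  have hmax := pv_max_range bl.toNat
  have hblc : ((bl.toNat : Nat) : Int) = bl := by omega
  rw [hblc] at hmax
  have hc : (PySem.List.max? (PySem.Dict.keys
      ((PySem.List.enumerate segs 0).foldl pvSeqStep (PySem.Dict.empty.insert 0 0, none, 0)).1)
      (fun x => x)).getD 0 = bl := by
    rw [h6, hmax]
    rfl
  unfold pvStage1A pvScanB
  rw [hB]
  dsimp only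
  rw [hc, h7]
  exact ⟨rfl, h8, h4, h9, h10⟩

theorem pv_fold_seven : ∀ (xs : List (List Char)) (k : Int) (acc : List (List Char)),
    (PySem.List.enumerate xs k).foldl
        (fun acc (p : Int × List Char) => acc ++ if p.1 = 7 then [([] : List Char)] else []) acc =
      acc ++ (if k ≤ 7 ∧ 7 < k + xs.length then [([] : List Char)] else []) := by
  intro xs
  induction xs with
  | nil => intro k acc; simp [PySem.List.enumerate]
  | cons x t ih =>
    intro k acc
    rw [PySem.List.enumerate_cons, List.foldl_cons]
    dsimp only
    rw [ih (k+1)]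
    simp only [List.length_cons]
    push_cast
    split_ifs <;> first | (exfalso; omega) | simp

theorem pv_stage2_small (segs : List (List Char)) (bs bl : Int) (hbl : bl ≤ 1) :
    pvStage2A segs bs bl = PySem.Chars.join [':'] segs := by
  unfold pvStage2A
  have hcongr : ∀ (acc : List (List Char)), ∀ p ∈ PySem.List.enumerate segs 0,
      pvOutStepA bs bl acc p = acc ++ [p.2] := by
    intro acc p _
    unfold pvOutStepA
    rw [if_neg (by omega), if_neg (by omega)]
  rw [PySem.List.foldl_congr_mem _ _ _ _ hcongr, PySem.List.foldl_append_singleton_eq_map,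
    PySem.List.map_snd_enumerate]
  rfl

theorem pv_stage2_eq (segs : List (List Char)) (bs bl : Int) (hb0 : 0 ≤ bs) (hb1 : 0 ≤ bl)
    (hb2 : bs + bl ≤ segs.length) (hb8 : segs.length ≤ 8) (hz : bl = 0 → bs = 0) :
    pvStage2A segs bs bl = pvBuildB segs bs bl := by
  by_cases hsm : bl ≤ 1
  · rw [pv_stage2_small segs bs bl hsm]
    unfold pvBuildB
    rw [if_pos hsm]
  · -- bl ≥ 2 : three-phase split
    have h2b : 2 ≤ bl := by omega
    set t1 := segs.take bs.toNat with ht1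
    set t2 := (segs.drop bs.toNat).take bl.toNat with ht2
    set t3 := segs.drop (bs + bl).toNat with ht3
    have hlen1 : (t1.length : Int) = bs := by
      rw [ht1]; simp; omega
    have hlen2 : (t2.length : Int) = bl := by
      rw [ht2]; simp; omega
    have hsplit : segs = t1 ++ (t2 ++ t3) := by
      rw [ht1, ht2, ht3]
      rw [show (bs + bl).toNat = bs.toNat + bl.toNat from by omega, ← List.drop_drop]
      rw [List.take_append_drop, List.take_append_drop]
    obtain ⟨m0, mrest, hm⟩ : ∃ m0 mrest, t2 = m0 :: mrest := by
      rcases hmm : t2 with _ | ⟨m0, mrest⟩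
      · exfalso; rw [hmm] at hlen2; simp at hlen2; omega
      · exact ⟨m0, mrest, rfl⟩
    have hmr : (mrest.length : Int) = bl - 1 := by
      rw [hm] at hlen2
      simp only [List.length_cons] at hlen2
      push_cast at hlen2
      omega
    -- A side
    unfold pvStage2A
    conv_lhs => rw [hsplit]
    rw [PySem.List.enumerate_append, List.foldl_append]
    have hfold1 : ∀ (acc : List (List Char)), (PySem.List.enumerate t1 0).foldl (pvOutStepA bs bl) acc = acc ++ t1 := by
      intro acc
      have hcongr : ∀ (acc : List (List Char)), ∀ p ∈ PySem.List.enumerate t1 0,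
          pvOutStepA bs bl acc p = acc ++ [p.2] := by
        intro acc p hp
        rw [PySem.List.mem_enumerate_iff] at hp
        obtain ⟨j, hj, rfl⟩ := hp
        have hjb : (j : Int) < bs := by omega
        unfold pvOutStepA
        rw [if_neg (by dsimp only; omega), if_neg (by dsimp only; omega)]
      rw [PySem.List.foldl_congr_mem _ _ _ _ hcongr, PySem.List.foldl_append_singleton_eq_map,
        PySem.List.map_snd_enumerate]
    rw [hfold1]
    rw [hm]
    rw [List.cons_append]
    rw [PySem.List.enumerate_cons]
    rw [List.foldl_cons]
    rw [show (0 : Int) + t1.length = bs from by rw [hlen1]; ring]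
    have hstep : pvOutStepA bs bl (([] : List (List Char)) ++ t1) (bs, m0) =
        t1 ++ (if bs = 0 then [([] : List Char)] else []) ++ [[]] := by
      unfold pvOutStepA
      rw [if_pos ⟨rfl, by omega⟩]
      dsimp only
      rw [if_neg (show ¬ ((bs : Int) = 7) from by omega)]
      simp
    rw [hstep]
    rw [PySem.List.enumerate_append, List.foldl_append]
    have hfold2 : ∀ (acc : List (List Char)), (PySem.List.enumerate mrest (bs + 1)).foldl (pvOutStepA bs bl) acc =
        acc ++ (if bs + bl = 8 then [([] : List Char)] else []) := by
      intro acc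
      have hcongr : ∀ (acc : List (List Char)), ∀ p ∈ PySem.List.enumerate mrest (bs+1),
          pvOutStepA bs bl acc p = acc ++ (if p.1 = 7 then [([] : List Char)] else []) := by
        intro acc p hp
        rw [PySem.List.mem_enumerate_iff] at hp
        obtain ⟨j, hj, rfl⟩ := hp
        have hjb : (j : Int) < bl - 1 := by omega
        unfold pvOutStepA
        rw [if_neg (by dsimp only; omega), if_pos (by dsimp only; constructor <;> omega)]
      rw [PySem.List.foldl_congr_mem _ _ _ _ hcongr, pv_fold_seven]
      by_cases h8 : bs + bl = 8
      · rw [if_pos h8, if_pos (by constructor <;> omega)]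
      · rw [if_neg h8, if_neg (by rintro ⟨u, v⟩; omega)]
    rw [hfold2]
    have hfold3 : ∀ (acc : List (List Char)), (PySem.List.enumerate t3 (bs + 1 + mrest.length)).foldl (pvOutStepA bs bl) acc = acc ++ t3 := by
      intro acc
      have hcongr : ∀ (acc : List (List Char)), ∀ p ∈ PySem.List.enumerate t3 (bs + 1 + mrest.length),
          pvOutStepA bs bl acc p = acc ++ [p.2] := by
        intro acc p hp
        rw [PySem.List.mem_enumerate_iff] at hp
        obtain ⟨j, hj, rfl⟩ := hp
        unfold pvOutStepA
        rw [if_neg (by dsimp only; omega), if_neg (by dsimp only; omega)]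
      rw [PySem.List.foldl_congr_mem _ _ _ _ hcongr, PySem.List.foldl_append_singleton_eq_map,
        PySem.List.map_snd_enumerate]
    rw [hfold3]
    -- B side
    unfold pvBuildB
    rw [if_neg hsm, ← ht1, ← ht3]
    congr 1
    by_cases h8 : bs + bl = 8
    · have ht3nil : t3 = [] := by
        rw [ht3]
        apply List.drop_eq_nil_of_le
        omega
      rw [if_pos h8, ht3nil]
      by_cases h0 : bs = 0
      · have ht1nil : t1 = [] := by
          rw [ht1, h0]
          simp
        rw [if_pos h0, ht1nil]
        simp
      · rw [if_neg h0]
        simp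
    · rw [if_neg h8]
      by_cases h0 : bs = 0
      · have ht1nil : t1 = [] := by
          rw [ht1, h0]
          simp
        rw [if_pos h0, ht1nil]
        simp
      · rw [if_neg h0]
        simp

theorem pv_lowerChar_colon (c : Char) (h : PySem.Chars.lowerChar c = ':') : c = ':' := by
  unfold PySem.Chars.lowerChar at h
  split_ifs at h with h1
  · exfalso
    unfold PySem.Chars.isupper at h1
    simp only [Bool.and_eq_true, decide_eq_true_eq, Char.le_def] at h1
    have hb : 65 ≤ c.toNat ∧ c.toNat ≤ 90 := by
      obtain ⟨u, v⟩ := h1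
      exact ⟨u, v⟩
    have hv : (Char.ofNat (c.toNat + 32)).toNat = c.toNat + 32 := by
      rw [Char.toNat_ofNat, if_pos]
      unfold Nat.isValidChar
      omega
    rw [h] at hv
    have h58 : (':' : Char).toNat = 58 := by decide
    omega
  · exact h

theorem pv_count_colon_lower (s : List Char) :
    (PySem.Chars.lower s).count ':' = s.count ':' := by
  induction s with
  | nil => rfl
  | cons c t ih =>
    unfold PySem.Chars.lower at ih ⊢
    rw [List.map_cons, List.count_cons, List.count_cons, ih]
    congr 1
    by_cases hc : c = ':'
    · subst hc
      rfl
    · have : ¬ PySem.Chars.lowerChar c = ':' := fun he => hc (pv_lowerChar_colon c he)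
      simp [hc, this]

theorem pv_splitOn_go_len : ∀ (fuel : Nat) (l cur : List Char) (acc : List (List Char)),
    l.length < fuel →
    (PySem.Chars.splitOn.go [':'] fuel l cur acc).length = acc.length + 1 + l.count ':' := by
  intro fuel
  induction fuel with
  | zero => intro l cur acc h; omega
  | succ f ih =>
    intro l cur acc h
    rcases l with _ | ⟨c, rest⟩
    · rw [PySem.Chars.splitOn.go.eq_def]
      simp
    · rw [PySem.Chars.splitOn.go.eq_def]
      simp only [List.length_cons] at h
      by_cases hc : c = ':'
      · subst hc
        have hp : [':'].isPrefixOf (':' :: rest) = true := by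
          simp [List.isPrefixOf]
        simp only [hp, if_true]
        rw [ih _ _ _ (by simpa using by omega)]
        simp
        omega
      · have hcc : ¬ (':' = c) := fun he => hc he.symm
        have hp : [':'].isPrefixOf (c :: rest) = false := by
          simp [List.isPrefixOf]
          intro he
          exact absurd he hcc
        simp only [hp, Bool.false_eq_true, if_false]
        rw [ih _ _ _ (by omega)]
        rw [List.count_cons]
        have hb : (c == ':') = false := by simpa using hc
        simp [hb]

theorem pv_splitOn_len (s : List Char) :
    (PySem.Chars.splitOn s [':']).length = s.count ':' + 1 := by
  unfold PySem.Chars.splitOn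
  rw [pv_splitOn_go_len (s.length + 1) s [] [] (by omega)]
  simp
  omega

theorem pv_join_count (parts : List (List Char)) (h : ∀ p ∈ parts, p.count ':' = 0) :
    (PySem.Chars.join [':'] parts).count ':' = parts.length - 1 := by
  induction parts with
  | nil => rfl
  | cons p rest ih =>
    rcases rest with _ | ⟨q, r⟩
    · rw [PySem.Chars.join_singleton]
      simp [h p (by simp)]
    · rw [PySem.Chars.join_cons_cons, List.count_append, List.count_append]
      rw [ih (fun x hx => h x (by simp [hx]))]
      rw [h p (by simp)]
      simp
      omega

theorem pv_hex_no_colon {s : List Char} (hs : s.all pvIsHex = true) : s.count ':' = 0 := by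
  rw [List.count_eq_zero]
  intro hmem
  rw [List.all_eq_true] at hs
  have := hs ':' hmem
  simp [pvIsHex] at this

theorem pv_rjust_count {s : List Char} (hs : s.all pvIsHex = true) :
    (pvRjust4 s).count ':' = 0 := by
  unfold pvRjust4
  split_ifs
  · exact pv_hex_no_colon hs
  · rw [List.count_append, pv_hex_no_colon hs, List.count_replicate]
    simp

theorem pv_normLoop_props : ∀ (segs : List (List Char)) (fill : Int) (parts : List (List Char)),
    pvNormLoop segs fill = some parts → 0 ≤ fill → (∀ s ∈ segs, s.all pvIsHex = true) →
    parts.length ≤ segs.length + fill.toNat ∧ ∀ p ∈ parts, p.count ':' = 0 := by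
  intro segs
  induction segs with
  | nil =>
    intro fill parts h _ _
    unfold pvNormLoop at h
    simp only [Option.some.injEq] at h
    subst h
    simp
  | cons s rest ih =>
    intro fill parts h hf hhex
    unfold pvNormLoop at h
    by_cases hs : s = []
    · rw [if_pos hs] at h
      by_cases h0 : fill = 0
      · rw [if_pos h0] at h
        exact absurd h (by simp)
      · rw [if_neg h0] at h
        rcases hr : pvNormLoop rest 0 with _ | r
        · rw [hr] at h
          exact absurd h (by simp)
        · rw [hr] at h
          simp only [Option.map_some, Option.some.injEq] at h
          subst h
          obtain ⟨ihl, ihc⟩ := ih 0 r hr (le_refl 0) (fun x hx => hhex x (by simp [hx]))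
          constructor
          · rw [List.length_append, List.length_replicate]
            simp only [List.length_cons]
            omega
          · intro p hp
            rw [List.mem_append] at hp
            rcases hp with hp | hp
            · rw [List.eq_of_mem_replicate hp]
              rfl
            · exact ihc p hp
    · rw [if_neg hs] at h
      rcases hv : PySem.Int.ofCharsBase? s 16 with _ | v
      · rw [hv] at h
        exact absurd h (by simp)
      · rw [hv] at h
        rcases hr : pvNormLoop rest fill with _ | r
        · rw [hr] at h
          exact absurd h (by simp)
        · rw [hr] at h
          simp only [Option.map_some, Option.some.injEq] at h
          subst h
          obtain ⟨ihl, ihc⟩ := ih fill r hr hf (fun x hx => hhex x (by simp [hx]))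
          constructor
          · simp only [List.length_cons]
            omega
          · intro p hp
            rcases hp with _ | hp
            · exact pv_rjust_count (hhex s (by simp))
            · exact ihc p (by assumption)

theorem pv_parse_len : ∀ (l : List (List Char)) (vs : List Int),
    pvParseAll l = some vs → vs.length = l.length := by
  intro l
  induction l with
  | nil =>
    intro vs h
    unfold pvParseAll at h
    simp only [Option.some.injEq] at h
    subst h
    rfl
  | cons s rest ih =>
    intro vs h
    unfold pvParseAll at h
    rcases hv : PySem.Int.ofCharsBase? s 16 with _ | v
    · rw [hv] at h
      exact absurd h (by simp)
    · rw [hv] at h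
      rcases hr : pvParseAll rest with _ | r
      · rw [hr] at h
        exact absurd h (by simp)
      · rw [hr] at h
        simp only [Option.map_some, Option.some.injEq] at h
        subst h
        simp [ih r hr]

theorem pv_segments_len (ip : List Char) (segments : List (List Char))
    (hhex : ∀ s ∈ PySem.Chars.splitOn
        (if PySem.Chars.endswith (if PySem.Chars.startswith ip [':', ':'] then '0' :: ip else ip) [':', ':']
          then (if PySem.Chars.startswith ip [':', ':'] then '0' :: ip else ip) ++ ['0']
          else (if PySem.Chars.startswith ip [':', ':'] then '0' :: ip else ip)) [':'],
        s.all pvIsHex = true)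
    (h : pvSegments? ip = some segments) : segments.length ≤ 8 := by
  unfold pvSegments? at h
  rcases hn : pvNormalize? ip with _ | theip
  · rw [hn] at h
    exact absurd h (by simp)
  · rw [hn] at h
    dsimp only at h
    rcases hp : pvParseAll (PySem.Chars.splitOn theip [':']) with _ | vs
    · rw [hp] at h
      exact absurd h (by simp)
    · rw [hp] at h
      simp only [Option.map_some, Option.some.injEq] at h
      subst h
      rw [List.length_map, pv_parse_len _ _ hp, pv_splitOn_len]
      simp only [pvNormalize?] at hn
      generalize hseg : PySem.Chars.splitOn
        (if PySem.Chars.endswith (if PySem.Chars.startswith ip [':', ':'] then '0' :: ip else ip) [':', ':']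
          then (if PySem.Chars.startswith ip [':', ':'] then '0' :: ip else ip) ++ ['0']
          else (if PySem.Chars.startswith ip [':', ':'] then '0' :: ip else ip)) [':'] = SEGS at hn hhex
      split_ifs at hn with hg1 hg2
      rcases hpl : pvNormLoop SEGS (8 - (SEGS.length : Int)) with _ | parts
      · rw [hpl] at hn
        exact absurd hn (by simp)
      · rw [hpl] at hn
        simp only [Option.map_some, Option.some.injEq] at hn
        obtain ⟨hlen, hcol⟩ := pv_normLoop_props _ _ _ hpl (by omega) hhex
        rw [← hn, pv_count_colon_lower, pv_join_count parts hcol]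
        omega

theorem pv_main (ip : String) (hpre : Pre_clean_ip ip) : clean_ip ip = clean_ip_alt ip := by
  unfold clean_ip clean_ip_alt
  rcases h : pvSegments? ip.toList with _ | segments
  · rfl
  · simp only [Pre_clean_ip] at hpre
    obtain ⟨-, -, hhex, -, -⟩ := hpre
    have hlen := pv_segments_len ip.toList segments hhex h
    obtain ⟨hst, hbs, hbl, hsum, hz⟩ := pv_stage1_eq segments
    dsimp only
    rw [hst]
    dsimp only
    congr 1
    exact pv_stage2_eq segments _ _ hbs hbl hsum hlen hz

-- ===== VERDICT (by name: the statement is the Claim_ definition above) =====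
theorem clean_ip_spec : Claim_equal_clean_ip := by
  intro ip _ hpre
  unfold Spec_clean_ip
  exact pv_main ip hpre
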